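-- pv_equiv track=rewrite | github.com/yujhtheyujh/dmoj-solutions | candyman.py | f
-- ===== SOURCE A (Python) =====
-- def f(n, b):
--     m = 0
--     n = str(n)
--     for i in n:
--         m *= b
--         m += int(i)
--         if int(i) >= b:
--             return 0
--     return m
-- ===== SOURCE B (Python) =====
-- def f(n, b):
--     digits = [int(ch) for ch in str(n)]
--     if any(d >= b for d in digits):
--         return 0
--     return sum(d * b ** p for p, d in enumerate(reversed(digits)))
-- ===== Notes on version B (the rewrite author's own statement) =====
-- stated objective: alternative
-- what changed: Replaces the single early-returning Horner loop with two staged loop-free passes: an any() validity check over all digits, then a sum of explicit positional weights d*b**p over enumerate(reversed(digits)).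
import Mathlib
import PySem

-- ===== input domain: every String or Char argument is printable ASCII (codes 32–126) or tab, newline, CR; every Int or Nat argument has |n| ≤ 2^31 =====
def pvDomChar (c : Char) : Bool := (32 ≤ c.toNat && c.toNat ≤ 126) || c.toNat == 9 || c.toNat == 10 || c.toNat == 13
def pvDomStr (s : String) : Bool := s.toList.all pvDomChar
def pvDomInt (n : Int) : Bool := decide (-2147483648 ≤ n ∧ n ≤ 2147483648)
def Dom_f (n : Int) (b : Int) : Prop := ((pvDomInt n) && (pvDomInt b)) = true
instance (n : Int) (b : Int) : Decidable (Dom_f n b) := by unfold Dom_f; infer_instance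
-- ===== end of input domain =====

-- B re-implements A's early-returning Horner loop as two staged loop-free passes
-- (an any() validity check, then a sum of positional weights); return values only.

-- int(i) for a single character i (exact on the decimal-digit characters admitted by Pre_f)
def digitVal (c : Char) : Int := (c.toNat : Int) - 48

-- ===== PORT A =====
-- for i in n: m *= b; m += int(i); if int(i) >= b: return 0
def fAux (b : Int) : List Int → Int → Int
  | [], m => m
  | d :: ds, m => if b ≤ d then 0 else fAux b ds (m * b + d)

def f (n : Int) (b : Int) : Int :=
  fAux b ((PySem.Int.toStr n).toList.map digitVal) 0

-- ===== PORT B =====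
-- digits = [int(ch) for ch in str(n)]
-- if any(d >= b for d in digits): return 0
-- return sum(d * b ** p for p, d in enumerate(reversed(digits)))
def f_alt (n : Int) (b : Int) : Int :=
  let digits := (PySem.Int.toStr n).toList.map digitVal
  if digits.any (fun d => decide (b ≤ d)) then 0
  else ((PySem.List.enumerate digits.reverse 0).map (fun pd => pd.2 * b ^ pd.1.toNat)).sum

-- ===== PRECONDITION & SPEC =====
-- Pre_f excludes n < 0, on which the Python A raises ValueError (int('-') on the sign character).
def Pre_f (n : Int) (b : Int) : Prop := 0 ≤ n
instance (n : Int) (b : Int) : Decidable (Pre_f n b) := by unfold Pre_f; infer_instance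
def pvWitness_f : Int × Int := (2024, 8)

def Spec_f (n : Int) (b : Int) (out : Int) : Prop := out = f_alt n b
instance (n : Int) (b : Int) (out : Int) : Decidable (Spec_f n b out) := by unfold Spec_f; infer_instance

-- ===== CLAIM (what is proved, stated in full; the proofs are below) =====
def Claim_equal_f : Prop := ∀ (n : Int) (b : Int), Dom_f n b → Pre_f n b → Spec_f n b (f n b)

-- ===== LEMMAS AND PROOFS =====

-- A returns 0 as soon as some digit is ≥ b
theorem fAux_zero (b : Int) (ds : List Int) (m : Int) (h : ∃ d ∈ ds, b ≤ d) :
    fAux b ds m = 0 := by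
  induction ds generalizing m with
  | nil => simp at h
  | cons d ds ih =>
      simp only [fAux]
      rcases h with ⟨e, he, hbe⟩
      rcases List.mem_cons.mp he with rfl | he'
      · simp [hbe]
      · split
        · rfl
        · exact ih _ ⟨e, he', hbe⟩

-- if every digit is < b, A's loop is the Horner fold
theorem fAux_horner (b : Int) (ds : List Int) (m : Int) (h : ∀ d ∈ ds, d < b) :
    fAux b ds m = ds.foldl (fun m d => m * b + d) m := by
  induction ds generalizing m with
  | nil => rfl
  | cons d ds ih =>
      have hd : d < b := h d (List.mem_cons_self ..)
      simp only [fAux, List.foldl_cons, if_neg (not_le.mpr hd)]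
      exact ih _ (fun e he => h e (List.mem_cons_of_mem _ he))

-- shifting the enumerate start by one multiplies B's weighted sum by b
theorem weightedSum_shift (b : Int) (l : List Int) (s : Nat) :
    ((PySem.List.enumerate l ((s : Int) + 1)).map (fun pd => pd.2 * b ^ pd.1.toNat)).sum
      = b * ((PySem.List.enumerate l (s : Int)).map (fun pd => pd.2 * b ^ pd.1.toNat)).sum := by
  induction l generalizing s with
  | nil => simp [PySem.List.enumerate_nil]
  | cons d ds ih =>
      have h1 : ((s : Int) + 1).toNat = s + 1 := by omega
      have h2 : ((s : Int) + 1 + 1) = ((s + 1 : Nat) : Int) + 1 := by push_cast; ring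
      simp only [PySem.List.enumerate_cons, List.map_cons, List.sum_cons, h1, h2, ih (s + 1)]
      have h3 : ((s + 1 : Nat) : Int) = (s : Int) + 1 := by push_cast; ring
      rw [h3]
      simp only [Int.toNat_natCast]
      ring

-- the Horner fold equals B's weighted sum over the reversed list
theorem horner_eq_weightedSum (b : Int) (l : List Int) :
    l.foldl (fun m d => m * b + d) 0
      = ((PySem.List.enumerate l.reverse 0).map (fun pd => pd.2 * b ^ pd.1.toNat)).sum := by
  induction l using List.reverseRecOn with
  | nil => simp [PySem.List.enumerate_nil]
  | append_singleton ls d ih =>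
      have h0 : (0 : Int) + 1 = ((0 : Nat) : Int) + 1 := by norm_num
      simp only [List.foldl_append, List.foldl_cons, List.foldl_nil, List.reverse_append,
        List.reverse_cons, List.reverse_nil, List.nil_append, List.cons_append,
        PySem.List.enumerate_cons, List.map_cons, List.sum_cons, ih, h0,
        weightedSum_shift b ls.reverse 0]
      norm_num
      ring

-- ===== VERDICT (by name: the statement is the Claim_ definition above) =====
theorem f_spec : Claim_equal_f := by
  intro n b _ _
  unfold Spec_f f f_alt
  set ds := (PySem.Int.toStr n).toList.map digitVal with hds
  by_cases h : ds.any (fun d => decide (b ≤ d))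
  · have h' : ∃ d ∈ ds, b ≤ d := by
      rcases List.any_eq_true.mp h with ⟨e, he, hbe⟩
      exact ⟨e, he, of_decide_eq_true hbe⟩
    simp only [fAux_zero b ds 0 h', h, if_true]
  · have h' : ∀ d ∈ ds, d < b := by
      intro d hd
      by_contra hc
      exact h (List.any_eq_true.mpr ⟨d, hd, decide_eq_true (not_lt.mp hc)⟩)
    simp only [h, if_false, Bool.false_eq_true]
    rw [fAux_horner b ds 0 h', horner_eq_weightedSum]
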